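-- pv_equiv track=rewrite | github.com/MartinUnity/games-pacman | src/level_generator.py | _verify_reachability
-- ===== SOURCE A (Python) =====
-- from collections import deque
--
-- def _verify_reachability(grid):
--     """BFS from the first empty cell — every empty cell must be visited."""
--     rows, cols = len(grid), len(grid[0])
--     start = None
--     for y in range(rows):
--         for x in range(cols):
--             if grid[y][x] == 0:
--                 start = (x, y)
--                 break
--         if start:
--             break
--     if start is None:
--         return False
--
--     visited = {start}
--     queue = deque([start])
--     while queue:
--         cx, cy = queue.popleft()
--         for dx, dy in ((0, -1), (0, 1), (-1, 0), (1, 0)):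
--             nx, ny = cx + dx, cy + dy
--             if (
--                 0 <= nx < cols
--                 and 0 <= ny < rows
--                 and (nx, ny) not in visited
--                 and grid[ny][nx] == 0
--             ):
--                 visited.add((nx, ny))
--                 queue.append((nx, ny))
--
--     return all(
--         grid[y][x] != 0 or (x, y) in visited for y in range(rows) for x in range(cols)
--     )
-- ===== SOURCE B (Python) =====
-- def _verify_reachability(grid):
--     """Union-find over cell indices instead of a BFS flood fill."""
--     rows, cols = len(grid), len(grid[0])
--     n = rows * cols
--     parent = list(range(n))
--
--     def find(i):
--         while parent[i] != i:
--             i = parent[i]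
--         return i
--
--     def union(a, b):
--         ra, rb = find(a), find(b)
--         if ra == rb:
--             return
--         if ra < rb:
--             parent[rb] = ra
--         else:
--             parent[ra] = rb
--
--     first = None
--     for y in range(rows):
--         for x in range(cols):
--             if grid[y][x] == 0:
--                 if first is None:
--                     first = y * cols + x
--                 if x + 1 < cols and grid[y][x + 1] == 0:
--                     union(y * cols + x, y * cols + x + 1)
--                 if y + 1 < rows and grid[y + 1][x] == 0:
--                     union(y * cols + x, (y + 1) * cols + x)
--     if first is None:
--         return False
--     root = find(first)
--     return all(
--         grid[y][x] != 0 or find(y * cols + x) == root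
--         for y in range(rows)
--         for x in range(cols)
--     )
-- ===== Notes on version B (the rewrite author's own statement) =====
-- stated objective: alternative
-- what changed: Replaces the BFS queue/visited-set flood fill with a union-find over cell indices y*cols+x: one row-major pass unions each empty cell with its empty right/down neighbour, then every empty cell's root is compared with the first empty cell's root.
-- outside the precondition, e.g. on _verify_reachability([[0, 1], [1, 1], [0]]): A returns False, B raises IndexError
import Mathlib
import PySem

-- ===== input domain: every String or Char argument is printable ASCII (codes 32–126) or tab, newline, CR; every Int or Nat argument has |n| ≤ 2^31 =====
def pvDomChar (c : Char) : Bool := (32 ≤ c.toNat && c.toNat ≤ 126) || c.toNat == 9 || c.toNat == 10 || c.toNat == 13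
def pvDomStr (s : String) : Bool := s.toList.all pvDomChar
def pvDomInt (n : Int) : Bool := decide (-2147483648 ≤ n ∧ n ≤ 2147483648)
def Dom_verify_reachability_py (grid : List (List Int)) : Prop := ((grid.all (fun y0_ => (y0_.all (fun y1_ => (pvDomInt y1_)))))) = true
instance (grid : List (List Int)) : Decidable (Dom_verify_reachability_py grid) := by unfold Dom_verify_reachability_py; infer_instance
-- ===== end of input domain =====

-- B replaces A's BFS flood fill by a union-find over cell indices (objective: alternative, same answer).
-- Equivalence is about the RETURN value; neither program mutates its argument.

-- ===== PORT A =====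
-- grid[y][x]; evaluated only at guarded indices 0 ≤ x < cols, 0 ≤ y < rows, where
-- under Pre_ (rows at least as long as row 0) the access is in range, so getD is exact.
def vrCell (grid : List (List Int)) (y x : Int) : Int :=
  (grid.getD y.toNat []).getD x.toNat 1

-- the double loop with `break` that finds the first empty cell in row-major order ((x, y))
def vrStart (grid : List (List Int)) (rows cols : Nat) : Option (Nat × Nat) :=
  (List.range rows).findSome? (fun (y : Nat) =>
    ((List.range cols).find? (fun (x : Nat) => vrCell grid (y : Int) (x : Int) == 0)).map
      (fun (x : Nat) => (x, y)))

-- the `while queue:` loop; state = (visited, queue); fuel rows*cols bounds the number of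
-- popleft steps (each pop was an enqueue, enqueued cells are distinct in-range cells — proved below)
def vrBfs (grid : List (List Int)) (rows cols : Nat) :
    Nat → PySem.Set (Int × Int) → List (Int × Int) → PySem.Set (Int × Int)
  | 0, visited, _ => visited
  | _ + 1, visited, [] => visited
  | fuel + 1, visited, c :: rest =>
    let st := [((0 : Int), (-1 : Int)), (0, 1), (-1, 0), (1, 0)].foldl
      (fun (st : PySem.Set (Int × Int) × List (Int × Int)) d =>
        let nx := c.1 + d.1
        let ny := c.2 + d.2
        if 0 ≤ nx ∧ nx < (cols : Int) ∧ 0 ≤ ny ∧ ny < (rows : Int) ∧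
            (nx, ny) ∉ st.1 ∧ vrCell grid ny nx = 0
        then (PySem.Set.add st.1 (nx, ny), st.2 ++ [(nx, ny)])
        else st)
      (visited, rest)
    vrBfs grid rows cols fuel st.1 st.2

def verify_reachability_py (grid : List (List Int)) : Bool :=
  let rows := grid.length
  let cols := (grid.getD 0 []).length
  match vrStart grid rows cols with
  | none => false
  | some s =>
    let start : Int × Int := ((s.1 : Int), (s.2 : Int))
    let visited := vrBfs grid rows cols (rows * cols) (PySem.Set.ofList [start]) [start]
    (List.range rows).all fun y => (List.range cols).all fun x =>
      (vrCell grid (y : Int) (x : Int) != 0) || decide (((x : Int), (y : Int)) ∈ visited)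

-- ===== PORT B =====
-- grid[y][x] with Nat indices (B only reads guarded in-range cells; exact under Pre_)
def vrCellN (grid : List (List Int)) (y x : Nat) : Int :=
  (grid.getD y []).getD x 1

-- `find`: follow parent links to the root.  Parents always point to strictly smaller
-- indices (proved below), so fuel n is enough for the Python while-loop.
def ufFind (parent : List Nat) : Nat → Nat → Nat
  | 0, i => i
  | f + 1, i =>
    let j := parent.getD i i
    if j = i then i else ufFind parent f j

-- `union`: link the larger root under the smaller one
def ufUnion (parent : List Nat) (n a b : Nat) : List Nat :=
  let ra := ufFind parent n a
  let rb := ufFind parent n b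
  if ra = rb then parent
  else if ra < rb then parent.set rb ra
  else parent.set ra rb

def verify_reachability_py_alt (grid : List (List Int)) : Bool :=
  let rows := grid.length
  let cols := (grid.getD 0 []).length
  let n := rows * cols
  let st := (List.range rows).foldl (fun st y =>
      (List.range cols).foldl (fun (st : List Nat × Option Nat) x =>
        if vrCellN grid y x = 0 then
          let first := match st.2 with | none => some (y * cols + x) | some f => some f
          let p1 := if x + 1 < cols ∧ vrCellN grid y (x + 1) = 0 then
                      ufUnion st.1 n (y * cols + x) (y * cols + x + 1) else st.1
          let p2 := if y + 1 < rows ∧ vrCellN grid (y + 1) x = 0 then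
                      ufUnion p1 n (y * cols + x) ((y + 1) * cols + x) else p1
          (p2, first)
        else st) st)
    (List.range n, (none : Option Nat))
  match st.2 with
  | none => false
  | some first =>
    let root := ufFind st.1 n first
    (List.range rows).all fun y => (List.range cols).all fun x =>
      (vrCellN grid y x != 0) || decide (ufFind st.1 n (y * cols + x) = root)

-- ===== PRECONDITION & SPEC =====
-- Pre_ excludes the empty grid (A raises IndexError on grid[0]) and ragged grids in which some
-- row is shorter than row 0: there both programs index past a row's end — A raises IndexError
-- except when all()'s short-circuit happens to return False first, and B raises IndexError.
def Pre_verify_reachability_py (grid : List (List Int)) : Prop :=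
  grid ≠ [] ∧ ∀ row ∈ grid, (grid.getD 0 []).length ≤ row.length
instance (grid : List (List Int)) : Decidable (Pre_verify_reachability_py grid) := by
  unfold Pre_verify_reachability_py; infer_instance

def pvWitness_verify_reachability_py : List (List Int) := [[0, 1], [0, 0]]

def Spec_verify_reachability_py (grid : List (List Int)) (out : Bool) : Prop := out = verify_reachability_py_alt grid
instance (grid : List (List Int)) (out : Bool) : Decidable (Spec_verify_reachability_py grid out) := by unfold Spec_verify_reachability_py; infer_instance

-- ===== CLAIM (what is proved, stated in full; the proofs are below) =====
def Claim_equal_verify_reachability_py : Prop := ∀ (grid : List (List Int)), Dom_verify_reachability_py grid → Pre_verify_reachability_py grid → Spec_verify_reachability_py grid (verify_reachability_py grid)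

-- ===== LEMMAS AND PROOFS =====

-- ---------- the common specification: connectivity of empty cells ----------

-- cells are (x, y) : Nat × Nat
def vrEmp (grid : List (List Int)) (c : Nat × Nat) : Prop :=
  c.1 < (grid.getD 0 []).length ∧ c.2 < grid.length ∧ vrCellN grid c.2 c.1 = 0

def vrStp (grid : List (List Int)) (c d : Nat × Nat) : Prop :=
  vrEmp grid c ∧ vrEmp grid d ∧
    ((c.2 = d.2 ∧ (c.1 + 1 = d.1 ∨ d.1 + 1 = c.1)) ∨
     (c.1 = d.1 ∧ (c.2 + 1 = d.2 ∨ d.2 + 1 = c.2)))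

def vrConn (grid : List (List Int)) (c d : Nat × Nat) : Prop :=
  Relation.ReflTransGen (vrStp grid) c d

def vrEnc (c : Nat × Nat) : Int × Int := ((c.1 : Int), (c.2 : Int))

def vrIdx (cols : Nat) (c : Nat × Nat) : Nat := c.2 * cols + c.1

theorem vrStp_symm (grid : List (List Int)) : Symmetric (vrStp grid) := by
  intro c d h
  obtain ⟨h1, h2, h3⟩ := h
  exact ⟨h2, h1, by tauto⟩

theorem vrConn_symm (grid : List (List Int)) {c d : Nat × Nat} (h : vrConn grid c d) :
    vrConn grid d c := Relation.ReflTransGen.symmetric (vrStp_symm grid) h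

theorem vrIdx_lt {cols rows : Nat} {c : Nat × Nat} (hx : c.1 < cols) (hy : c.2 < rows) :
    vrIdx cols c < rows * cols := by
  have h1 : vrIdx cols c < (c.2 + 1) * cols := by
    simp only [vrIdx, Nat.succ_mul]; omega
  have h2 : (c.2 + 1) * cols ≤ rows * cols := Nat.mul_le_mul_right _ hy
  omega

theorem vrIdx_inj {cols : Nat} {c d : Nat × Nat} (hc : c.1 < cols) (hd : d.1 < cols)
    (h : vrIdx cols c = vrIdx cols d) : c = d := by
  have hc0 : 0 < cols := Nat.lt_of_le_of_lt (Nat.zero_le _) hc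
  have e1 : (c.2 * cols + c.1) / cols = c.2 := by
    rw [mul_comm, Nat.mul_add_div hc0, Nat.div_eq_of_lt hc]
    omega
  have e2 : (d.2 * cols + d.1) / cols = d.2 := by
    rw [mul_comm, Nat.mul_add_div hc0, Nat.div_eq_of_lt hd]
    omega
  simp only [vrIdx] at h
  have hy : c.2 = d.2 := by rw [← e1, ← e2, h]
  have hx : c.1 = d.1 := by rw [hy] at h; omega
  exact Prod.ext hx hy

theorem vrEnc_inj {c d : Nat × Nat} (h : vrEnc c = vrEnc d) : c = d := by
  simp only [vrEnc, Prod.ext_iff] at h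
  exact Prod.ext (by exact_mod_cast h.1) (by exact_mod_cast h.2)

-- ---------- generic EqvGen utilities ----------

theorem eqvGen_of_rel_iff {α : Type} {R R' : α → α → Prop}
    (h : ∀ i j, R i j ↔ R' i j) {i j : α} (hg : Relation.EqvGen R i j) :
    Relation.EqvGen R' i j := by
  induction hg with
  | rel u v hr => exact Relation.EqvGen.rel _ _ ((h u v).mp hr)
  | refl => exact Relation.EqvGen.refl _
  | symm _ _ _ ih => exact Relation.EqvGen.symm _ _ ih
  | trans _ _ _ _ _ ih1 ih2 => exact Relation.EqvGen.trans _ _ _ ih1 ih2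

theorem eqvGen_of_rtg {α : Type} {R : α → α → Prop} {i j : α}
    (h : Relation.ReflTransGen R i j) : Relation.EqvGen R i j := by
  induction h with
  | refl => exact Relation.EqvGen.refl _
  | tail _ h2 ih => exact Relation.EqvGen.trans _ _ _ ih (Relation.EqvGen.rel _ _ h2)

theorem eqvGen_or_mono {α : Type} {R R' Q : α → α → Prop}
    (h : ∀ i j, Relation.EqvGen R i j → Relation.EqvGen R' i j) {i j : α}
    (hg : Relation.EqvGen (fun u v => R u v ∨ Q u v) i j) :
    Relation.EqvGen (fun u v => R' u v ∨ Q u v) i j := by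
  induction hg with
  | rel u v hr =>
    rcases hr with hr | hq
    · exact Relation.EqvGen.mono (fun a b hab => Or.inl hab) (h u v (Relation.EqvGen.rel _ _ hr))
    · exact Relation.EqvGen.rel _ _ (Or.inr hq)
  | refl => exact Relation.EqvGen.refl _
  | symm _ _ _ ih => exact Relation.EqvGen.symm _ _ ih
  | trans _ _ _ _ _ ih1 ih2 => exact Relation.EqvGen.trans _ _ _ ih1 ih2

theorem eqvGen_or_congr {α : Type} {R R' Q : α → α → Prop}
    (h : ∀ i j, Relation.EqvGen R i j ↔ Relation.EqvGen R' i j) (i j : α) :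
    Relation.EqvGen (fun u v => R u v ∨ Q u v) i j ↔
      Relation.EqvGen (fun u v => R' u v ∨ Q u v) i j :=
  ⟨eqvGen_or_mono (fun a b => (h a b).mp), eqvGen_or_mono (fun a b => (h a b).mpr)⟩

theorem eqvGen_or_single_absorb {α : Type} {R : α → α → Prop} {a b : α}
    (h : Relation.EqvGen R a b) (i j : α) :
    Relation.EqvGen (fun u v => R u v ∨ (u = a ∧ v = b)) i j ↔ Relation.EqvGen R i j := by
  constructor
  · intro hg
    induction hg with
    | rel u v hr =>
      rcases hr with hr | ⟨h1, h2⟩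
      · exact Relation.EqvGen.rel _ _ hr
      · subst h1; subst h2; exact h
    | refl => exact Relation.EqvGen.refl _
    | symm _ _ _ ih => exact Relation.EqvGen.symm _ _ ih
    | trans _ _ _ _ _ ih1 ih2 => exact Relation.EqvGen.trans _ _ _ ih1 ih2
  · exact Relation.EqvGen.mono (fun a b hab => Or.inl hab)

theorem eqvGen_or_single_dir {α : Type} {R : α → α → Prop} {a b a' b' : α}
    (ha : Relation.EqvGen R a a') (hb : Relation.EqvGen R b b') {i j : α}
    (hg : Relation.EqvGen (fun u v => R u v ∨ (u = a ∧ v = b)) i j) :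
    Relation.EqvGen (fun u v => R u v ∨ (u = a' ∧ v = b')) i j := by
  induction hg with
  | rel u v hr =>
    rcases hr with hr | ⟨h1, h2⟩
    · exact Relation.EqvGen.rel _ _ (Or.inl hr)
    · subst h1; subst h2
      have lift : ∀ x y : α, Relation.EqvGen R x y →
          Relation.EqvGen (fun u v => R u v ∨ (u = a' ∧ v = b')) x y :=
        fun x y => Relation.EqvGen.mono (fun s t hst => Or.inl hst)
      refine Relation.EqvGen.trans _ _ _ (lift _ _ ha) ?_
      refine Relation.EqvGen.trans _ _ _ (Relation.EqvGen.rel _ _ (Or.inr ⟨rfl, rfl⟩)) ?_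
      exact lift _ _ (Relation.EqvGen.symm _ _ hb)
  | refl => exact Relation.EqvGen.refl _
  | symm _ _ _ ih => exact Relation.EqvGen.symm _ _ ih
  | trans _ _ _ _ _ ih1 ih2 => exact Relation.EqvGen.trans _ _ _ ih1 ih2

theorem eqvGen_or_single_swap {α : Type} {R : α → α → Prop} {a b : α} (i j : α) :
    Relation.EqvGen (fun u v => R u v ∨ (u = a ∧ v = b)) i j ↔
      Relation.EqvGen (fun u v => R u v ∨ (u = b ∧ v = a)) i j := by
  have dir : ∀ (x y : α) {c d : α},
      Relation.EqvGen (fun u v => R u v ∨ (u = c ∧ v = d)) x y →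
      Relation.EqvGen (fun u v => R u v ∨ (u = d ∧ v = c)) x y := by
    intro x y c d hg
    induction hg with
    | rel u v hr =>
      rcases hr with hr | ⟨h1, h2⟩
      · exact Relation.EqvGen.rel _ _ (Or.inl hr)
      · subst h1; subst h2
        exact Relation.EqvGen.symm _ _ (Relation.EqvGen.rel _ _ (Or.inr ⟨rfl, rfl⟩))
    | refl => exact Relation.EqvGen.refl _
    | symm _ _ _ ih => exact Relation.EqvGen.symm _ _ ih
    | trans _ _ _ _ _ ih1 ih2 => exact Relation.EqvGen.trans _ _ _ ih1 ih2
  exact ⟨dir i j, dir i j⟩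

theorem eqvGen_or_single_congr {α : Type} {R : α → α → Prop} {a b a' b' : α}
    (ha : Relation.EqvGen R a a') (hb : Relation.EqvGen R b b') (i j : α) :
    Relation.EqvGen (fun u v => R u v ∨ (u = a ∧ v = b)) i j ↔
      Relation.EqvGen (fun u v => R u v ∨ (u = a' ∧ v = b')) i j :=
  ⟨eqvGen_or_single_dir ha hb,
   eqvGen_or_single_dir (Relation.EqvGen.symm _ _ ha) (Relation.EqvGen.symm _ _ hb)⟩

-- ---------- union-find ----------

def UFInv (n : Nat) (p : List Nat) : Prop :=
  p.length = n ∧ ∀ i, i < n → p.getD i i ≤ i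

def PEdge (p : List Nat) (u v : Nat) : Prop :=
  u < p.length ∧ p.getD u u = v ∧ v ≠ u

theorem ufFind_succ (p : List Nat) (f i : Nat) :
    ufFind p (f + 1) i = if p.getD i i = i then i else ufFind p f (p.getD i i) := rfl

theorem uf_parent_le {n : Nat} {p : List Nat} (hp : UFInv n p) (i : Nat) :
    p.getD i i ≤ i := by
  by_cases hi : i < n
  · exact hp.2 i hi
  · have hl := hp.1
    rw [List.getD_eq_getElem?_getD, List.getElem?_eq_none (by omega : p.length ≤ i)]; rfl

theorem uf_find_root {n : Nat} {p : List Nat} (hp : UFInv n p) :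
    ∀ i f, i + 1 ≤ f → (p.getD (ufFind p f i) (ufFind p f i) = ufFind p f i) := by
  intro i
  induction i using Nat.strong_induction_on with
  | _ i ih =>
    intro f hf
    obtain ⟨f, rfl⟩ : ∃ f', f = f' + 1 := ⟨f - 1, by omega⟩
    by_cases hj : p.getD i i = i
    · rw [ufFind_succ, if_pos hj, hj]
    · have hle : p.getD i i ≤ i := uf_parent_le hp i
      have hlt : p.getD i i < i := lt_of_le_of_ne hle hj
      rw [ufFind_succ, if_neg hj]
      exact ih _ hlt f (by omega)

theorem uf_find_fuel {n : Nat} {p : List Nat} (hp : UFInv n p) :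
    ∀ i f f', i + 1 ≤ f → i + 1 ≤ f' → ufFind p f i = ufFind p f' i := by
  intro i
  induction i using Nat.strong_induction_on with
  | _ i ih =>
    intro f f' hf hf'
    obtain ⟨f, rfl⟩ : ∃ g, f = g + 1 := ⟨f - 1, by omega⟩
    obtain ⟨f', rfl⟩ : ∃ g, f' = g + 1 := ⟨f' - 1, by omega⟩
    by_cases hj : p.getD i i = i
    · rw [ufFind_succ, if_pos hj, ufFind_succ, if_pos hj]
    · have hlt : p.getD i i < i := lt_of_le_of_ne (uf_parent_le hp i) hj
      rw [ufFind_succ, if_neg hj, ufFind_succ, if_neg hj]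
      exact ih _ hlt f f' (by omega) (by omega)

theorem uf_find_le {n : Nat} {p : List Nat} (hp : UFInv n p) :
    ∀ f i, ufFind p f i ≤ i := by
  intro f
  induction f with
  | zero => intro i; exact Nat.le_refl i
  | succ f ih =>
    intro i
    by_cases hj : p.getD i i = i
    · rw [ufFind_succ, if_pos hj]
    · rw [ufFind_succ, if_neg hj]
      exact le_trans (ih _) (uf_parent_le hp i)

theorem uf_find_reach {n : Nat} {p : List Nat} (hp : UFInv n p) :
    ∀ i f, i + 1 ≤ f → Relation.ReflTransGen (PEdge p) i (ufFind p f i) := by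
  intro i
  induction i using Nat.strong_induction_on with
  | _ i ih =>
    intro f hf
    obtain ⟨f, rfl⟩ : ∃ g, f = g + 1 := ⟨f - 1, by omega⟩
    by_cases hj : p.getD i i = i
    · rw [ufFind_succ, if_pos hj]
    · have hlen : i < p.length := by
        by_contra hik
        exact hj (by rw [List.getD_eq_getElem?_getD, List.getElem?_eq_none (by omega)]; rfl)
      have hlt : p.getD i i < i := lt_of_le_of_ne (uf_parent_le hp i) hj
      rw [ufFind_succ, if_neg hj]
      exact Relation.ReflTransGen.head ⟨hlen, rfl, hj⟩ (ih _ hlt f (by omega))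

theorem uf_find_eq_of_pedge {n : Nat} {p : List Nat} (hp : UFInv n p) {i j : Nat}
    (h : PEdge p i j) : ufFind p n i = ufFind p n j := by
  obtain ⟨hlen, hgd, hne⟩ := h
  have hin : i < n := by rw [← hp.1]; exact hlen
  have hj : j ≠ i := hne
  have hjlt : j < i := by
    have := uf_parent_le hp i; omega
  obtain ⟨m, hm⟩ : ∃ m, n = m + 1 := ⟨n - 1, by omega⟩
  calc ufFind p n i = ufFind p m j := by
        rw [hm, ufFind_succ, hgd, if_neg (by omega : j ≠ i)]
    _ = ufFind p n j := uf_find_fuel hp j m n (by omega) (by omega)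

theorem uf_sameRt_iff {n : Nat} {p : List Nat} (hp : UFInv n p) {i j : Nat}
    (hi : i < n) (hj : j < n) :
    ufFind p n i = ufFind p n j ↔ Relation.EqvGen (PEdge p) i j := by
  constructor
  · intro h
    have ri := eqvGen_of_rtg (uf_find_reach hp i n (by omega))
    have rj := eqvGen_of_rtg (uf_find_reach hp j n (by omega))
    rw [h] at ri
    exact Relation.EqvGen.trans _ _ _ ri (Relation.EqvGen.symm _ _ rj)
  · intro hg
    clear hi hj
    induction hg with
    | rel u v hr => exact uf_find_eq_of_pedge hp hr
    | refl => rfl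
    | symm u v h ih => exact Eq.symm ih
    | trans u v w h1 h2 ih1 ih2 => exact Eq.trans ih1 ih2

theorem uf_union_inv {n : Nat} {p : List Nat} (hp : UFInv n p) {a b : Nat}
    (ha : a < n) (hb : b < n) : UFInv n (ufUnion p n a b) := by
  have hra : ufFind p n a ≤ a := uf_find_le hp n a
  have hrb : ufFind p n b ≤ b := uf_find_le hp n b
  have hl := hp.1
  simp only [ufUnion]
  split_ifs with hre hrlt
  · exact hp
  · refine ⟨by simpa using hp.1, ?_⟩
    intro i hi
    by_cases hieq : i = ufFind p n b
    · subst hieq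
      rw [List.getD_eq_getElem?_getD, List.getElem?_set_self (by omega), Option.getD_some]
      omega
    · rw [List.getD_eq_getElem?_getD, List.getElem?_set_ne (by omega)]
      exact hp.2 i hi
  · refine ⟨by simpa using hp.1, ?_⟩
    intro i hi
    by_cases hieq : i = ufFind p n a
    · subst hieq
      rw [List.getD_eq_getElem?_getD, List.getElem?_set_self (by omega), Option.getD_some]
      omega
    · rw [List.getD_eq_getElem?_getD, List.getElem?_set_ne (by omega)]
      exact hp.2 i hi

theorem uf_union_eqv {n : Nat} {p : List Nat} (hp : UFInv n p) {a b : Nat}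
    (ha : a < n) (hb : b < n) (i j : Nat) :
    Relation.EqvGen (PEdge (ufUnion p n a b)) i j ↔
      Relation.EqvGen (fun u v => PEdge p u v ∨ (u = a ∧ v = b)) i j := by
  have hla : ufFind p n a ≤ a := uf_find_le hp n a
  have hlb : ufFind p n b ≤ b := uf_find_le hp n b
  have hroota : p.getD (ufFind p n a) (ufFind p n a) = ufFind p n a :=
    uf_find_root hp a n (by omega)
  have hrootb : p.getD (ufFind p n b) (ufFind p n b) = ufFind p n b :=
    uf_find_root hp b n (by omega)
  have hea : Relation.EqvGen (PEdge p) a (ufFind p n a) :=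
    eqvGen_of_rtg (uf_find_reach hp a n (by omega))
  have heb : Relation.EqvGen (PEdge p) b (ufFind p n b) :=
    eqvGen_of_rtg (uf_find_reach hp b n (by omega))
  have hl := hp.1
  simp only [ufUnion]
  split_ifs with hre hrlt
  · -- ra = rb : parent unchanged, edge (a, b) is absorbed
    have hab : Relation.EqvGen (PEdge p) a b := (uf_sameRt_iff hp ha hb).mp hre
    exact (eqvGen_or_single_absorb hab i j).symm
  · -- ra < rb : parent[rb] := ra, i.e. new edge (rb, ra)
    have hrel : ∀ u v, PEdge (p.set (ufFind p n b) (ufFind p n a)) u v ↔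
        (PEdge p u v ∨ (u = ufFind p n b ∧ v = ufFind p n a)) := by
      intro u v
      unfold PEdge
      by_cases hu : u = ufFind p n b
      · subst hu
        rw [List.getD_eq_getElem?_getD,
          List.getElem?_set_self (by rw [hp.1]; omega), Option.getD_some]
        constructor
        · rintro ⟨h1, rfl, h3⟩; exact Or.inr ⟨rfl, rfl⟩
        · rintro (⟨h1, h2, h3⟩ | ⟨-, rfl⟩)
          · rw [List.getD_eq_getElem?_getD] at hrootb
            exact absurd (hrootb ▸ h2) (by rw [← List.getD_eq_getElem?_getD] at *; omega)
          · exact ⟨by simp [hp.1]; omega, rfl, by omega⟩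
      · rw [List.getD_eq_getElem?_getD, List.getElem?_set_ne (by omega), List.length_set,
          ← List.getD_eq_getElem?_getD]
        constructor
        · rintro ⟨h1, h2, h3⟩; exact Or.inl ⟨h1, h2, h3⟩
        · rintro (⟨h1, h2, h3⟩ | ⟨h1, -⟩)
          · exact ⟨h1, h2, h3⟩
          · exact absurd h1 hu
    calc Relation.EqvGen (PEdge (p.set (ufFind p n b) (ufFind p n a))) i j
        ↔ Relation.EqvGen (fun u v => PEdge p u v ∨
            (u = ufFind p n b ∧ v = ufFind p n a)) i j :=
          ⟨eqvGen_of_rel_iff (fun u v => hrel u v),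
           eqvGen_of_rel_iff (fun u v => (hrel u v).symm)⟩
      _ ↔ Relation.EqvGen (fun u v => PEdge p u v ∨ (u = b ∧ v = a)) i j :=
          eqvGen_or_single_congr (Relation.EqvGen.symm _ _ heb)
            (Relation.EqvGen.symm _ _ hea) i j
      _ ↔ Relation.EqvGen (fun u v => PEdge p u v ∨ (u = a ∧ v = b)) i j :=
          eqvGen_or_single_swap i j
  · -- rb < ra : parent[ra] := rb, i.e. new edge (ra, rb)
    have hrel : ∀ u v, PEdge (p.set (ufFind p n a) (ufFind p n b)) u v ↔
        (PEdge p u v ∨ (u = ufFind p n a ∧ v = ufFind p n b)) := by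
      intro u v
      unfold PEdge
      by_cases hu : u = ufFind p n a
      · subst hu
        rw [List.getD_eq_getElem?_getD,
          List.getElem?_set_self (by rw [hp.1]; omega), Option.getD_some]
        constructor
        · rintro ⟨h1, rfl, h3⟩; exact Or.inr ⟨rfl, rfl⟩
        · rintro (⟨h1, h2, h3⟩ | ⟨-, rfl⟩)
          · rw [List.getD_eq_getElem?_getD] at hroota
            exact absurd (hroota ▸ h2) (by rw [← List.getD_eq_getElem?_getD] at *; omega)
          · exact ⟨by simp [hp.1]; omega, rfl, by omega⟩
      · rw [List.getD_eq_getElem?_getD, List.getElem?_set_ne (by omega), List.length_set,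
          ← List.getD_eq_getElem?_getD]
        constructor
        · rintro ⟨h1, h2, h3⟩; exact Or.inl ⟨h1, h2, h3⟩
        · rintro (⟨h1, h2, h3⟩ | ⟨h1, -⟩)
          · exact ⟨h1, h2, h3⟩
          · exact absurd h1 hu
    calc Relation.EqvGen (PEdge (p.set (ufFind p n a) (ufFind p n b))) i j
        ↔ Relation.EqvGen (fun u v => PEdge p u v ∨
            (u = ufFind p n a ∧ v = ufFind p n b)) i j :=
          ⟨eqvGen_of_rel_iff (fun u v => hrel u v),
           eqvGen_of_rel_iff (fun u v => (hrel u v).symm)⟩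
      _ ↔ Relation.EqvGen (fun u v => PEdge p u v ∨ (u = a ∧ v = b)) i j :=
          eqvGen_or_single_congr (Relation.EqvGen.symm _ _ hea)
            (Relation.EqvGen.symm _ _ heb) i j

theorem uf_fold {n : Nat} :
    ∀ (es : List (Nat × Nat)) (p : List Nat), UFInv n p →
      (∀ e ∈ es, e.1 < n ∧ e.2 < n) →
      UFInv n (es.foldl (fun q e => ufUnion q n e.1 e.2) p) ∧
      ∀ i j, Relation.EqvGen (PEdge (es.foldl (fun q e => ufUnion q n e.1 e.2) p)) i j ↔
        Relation.EqvGen (fun u v => PEdge p u v ∨ (u, v) ∈ es) i j := by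
  intro es
  induction es with
  | nil =>
    intro p hp _
    refine ⟨hp, fun i j => ?_⟩
    simp only [List.foldl_nil]
    constructor
    · exact eqvGen_of_rel_iff (fun u v => by simp)
    · exact eqvGen_of_rel_iff (fun u v => by simp)
  | cons e es ih =>
    intro p hp hed
    have he1 : e.1 < n := (hed e (List.mem_cons_self)).1
    have he2 : e.2 < n := (hed e (List.mem_cons_self)).2
    have hp1 : UFInv n (ufUnion p n e.1 e.2) := uf_union_inv hp he1 he2
    obtain ⟨hInv, hIff⟩ := ih (ufUnion p n e.1 e.2) hp1
      (fun e' he' => hed e' (List.mem_cons_of_mem _ he'))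
    refine ⟨by simpa using hInv, fun i j => ?_⟩
    simp only [List.foldl_cons]
    rw [hIff i j]
    calc Relation.EqvGen (fun u v => PEdge (ufUnion p n e.1 e.2) u v ∨ (u, v) ∈ es) i j
        ↔ Relation.EqvGen (fun u v =>
            (fun u v => PEdge p u v ∨ (u = e.1 ∧ v = e.2)) u v ∨ (u, v) ∈ es) i j :=
          eqvGen_or_congr (fun i j => uf_union_eqv hp he1 he2 i j) i j
      _ ↔ Relation.EqvGen (fun u v => PEdge p u v ∨ (u, v) ∈ e :: es) i j := by
          constructor
          · exact eqvGen_of_rel_iff (fun u v => by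
              simp only [List.mem_cons, Prod.ext_iff]; tauto)
          · exact eqvGen_of_rel_iff (fun u v => by
              simp only [List.mem_cons, Prod.ext_iff]; tauto)

theorem uf_range_inv (n : Nat) : UFInv n (List.range n) := by
  refine ⟨List.length_range, fun i hi => ?_⟩
  rw [List.getD_eq_getElem?_getD, List.getElem?_range hi]
  exact Nat.le_refl i

theorem pedge_range_false (n : Nat) (u v : Nat) : PEdge (List.range n) u v ↔ False := by
  simp only [PEdge, List.length_range, iff_false]
  rintro ⟨h1, h2, h3⟩
  rw [List.getD_eq_getElem?_getD, List.getElem?_range h1] at h2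
  exact h3 h2.symm

-- ---------- B: reduction of the nested fold to an edge list ----------

def vrFirstUpd (grid : List (List Int)) (cols y : Nat) (o : Option Nat) (x : Nat) : Option Nat :=
  if vrCellN grid y x = 0 then (match o with | none => some (y * cols + x) | some f => some f)
  else o

def vrCellEdges (grid : List (List Int)) (rows cols y x : Nat) : List (Nat × Nat) :=
  if vrCellN grid y x = 0 then
    (if x + 1 < cols ∧ vrCellN grid y (x + 1) = 0 then [(y * cols + x, y * cols + x + 1)]
     else []) ++
    (if y + 1 < rows ∧ vrCellN grid (y + 1) x = 0 then [(y * cols + x, (y + 1) * cols + x)]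
     else [])
  else []

def vrAllEdges (grid : List (List Int)) (rows cols : Nat) : List (Nat × Nat) :=
  (List.range rows).flatMap (fun y => (List.range cols).flatMap (vrCellEdges grid rows cols y))

def vrParentFinal (grid : List (List Int)) (rows cols n : Nat) : List Nat :=
  (vrAllEdges grid rows cols).foldl (fun q e => ufUnion q n e.1 e.2) (List.range n)

theorem foldl_flatMap_eq {α β γ : Type} (g : γ → List β) (f : α → β → α) :
    ∀ (l : List γ) (a : α),
      (l.flatMap g).foldl f a = l.foldl (fun acc c => (g c).foldl f acc) a := by
  intro l
  induction l with
  | nil => intro a; rfl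
  | cons c l ih => intro a; simp [List.flatMap_cons, List.foldl_append, ih]

def keepFirst {β γ : Type} (g : γ → Option β) (acc : Option β) (c : γ) : Option β :=
  match acc with | some f => some f | none => g c

theorem foldl_keepFirst_some {β γ : Type} (g : γ → Option β) (f : β) :
    ∀ l : List γ, l.foldl (keepFirst g) (some f) = some f := by
  intro l
  induction l with
  | nil => rfl
  | cons c l ih => simpa [keepFirst] using ih

theorem foldl_keepFirst_none {β γ : Type} (g : γ → Option β) :
    ∀ l : List γ, l.foldl (keepFirst g) none = l.findSome? g := by
  intro l
  induction l with
  | nil => rfl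
  | cons c l ih =>
    simp only [List.foldl_cons, List.findSome?_cons]
    cases hc : g c with
    | some f => simp [keepFirst, hc, foldl_keepFirst_some]
    | none => simp [keepFirst, hc, ih]

theorem findSome?_guard {β γ : Type} (P : γ → Prop) [DecidablePred P] (h : γ → β) :
    ∀ l : List γ, (l.findSome? (fun x => if P x then some (h x) else none)) =
      (l.find? (fun x => decide (P x))).map h := by
  intro l
  induction l with
  | nil => rfl
  | cons c l ih =>
    by_cases hc : P c <;> simp [List.findSome?_cons, List.find?_cons, hc, ih]

theorem findSome?_map_opt {α β γ : Type} (g : α → Option β) (h : β → γ) :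
    ∀ l : List α, (l.findSome? g).map h = l.findSome? (fun y => (g y).map h) := by
  intro l
  induction l with
  | nil => rfl
  | cons c l ih => cases hc : g c <;> simp [List.findSome?_cons, hc, ih]

theorem vrCell_natCast (grid : List (List Int)) (y x : Nat) :
    vrCell grid (y : Int) (x : Int) = vrCellN grid y x := by
  simp [vrCell, vrCellN]

-- the nested fold of B computes (union-find over the edge list, first empty cell)
theorem bAlt_state (grid : List (List Int)) (rows cols n : Nat) :
    ((List.range rows).foldl (fun st y =>
      (List.range cols).foldl (fun (st : List Nat × Option Nat) x =>
        if vrCellN grid y x = 0 then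
          let first := match st.2 with | none => some (y * cols + x) | some f => some f
          let p1 := if x + 1 < cols ∧ vrCellN grid y (x + 1) = 0 then
                      ufUnion st.1 n (y * cols + x) (y * cols + x + 1) else st.1
          let p2 := if y + 1 < rows ∧ vrCellN grid (y + 1) x = 0 then
                      ufUnion p1 n (y * cols + x) ((y + 1) * cols + x) else p1
          (p2, first)
        else st) st)
      (List.range n, (none : Option Nat))) =
    (vrParentFinal grid rows cols n,
     (vrStart grid rows cols).map (fun s => s.2 * cols + s.1)) := by
  have hcell : ∀ y : Nat, (fun (st : List Nat × Option Nat) x =>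
      if vrCellN grid y x = 0 then
        let first := match st.2 with | none => some (y * cols + x) | some f => some f
        let p1 := if x + 1 < cols ∧ vrCellN grid y (x + 1) = 0 then
                    ufUnion st.1 n (y * cols + x) (y * cols + x + 1) else st.1
        let p2 := if y + 1 < rows ∧ vrCellN grid (y + 1) x = 0 then
                    ufUnion p1 n (y * cols + x) ((y + 1) * cols + x) else p1
        (p2, first)
      else st) =
      (fun (st : List Nat × Option Nat) x =>
        ((vrCellEdges grid rows cols y x).foldl (fun q e => ufUnion q n e.1 e.2) st.1,
         vrFirstUpd grid cols y st.2 x)) := by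
    intro y
    funext st x
    by_cases h0 : vrCellN grid y x = 0
    · by_cases h1 : x + 1 < cols ∧ vrCellN grid y (x + 1) = 0 <;>
        by_cases h2 : y + 1 < rows ∧ vrCellN grid (y + 1) x = 0 <;>
          simp [vrCellEdges, vrFirstUpd, h0, h1, h2]
    · simp [vrCellEdges, vrFirstUpd, h0]
  have houter : (fun (st : List Nat × Option Nat) y =>
      (List.range cols).foldl (fun (st : List Nat × Option Nat) x =>
        if vrCellN grid y x = 0 then
          let first := match st.2 with | none => some (y * cols + x) | some f => some f
          let p1 := if x + 1 < cols ∧ vrCellN grid y (x + 1) = 0 then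
                      ufUnion st.1 n (y * cols + x) (y * cols + x + 1) else st.1
          let p2 := if y + 1 < rows ∧ vrCellN grid (y + 1) x = 0 then
                      ufUnion p1 n (y * cols + x) ((y + 1) * cols + x) else p1
          (p2, first)
        else st) st) =
      (fun (st : List Nat × Option Nat) y =>
        ((List.range cols).foldl
           (fun q x => (vrCellEdges grid rows cols y x).foldl (fun q e => ufUnion q n e.1 e.2) q)
           st.1,
         (List.range cols).foldl (vrFirstUpd grid cols y) st.2)) := by
    funext st y
    obtain ⟨a, b⟩ := st
    rw [hcell y]
    exact PySem.List.foldl_prod_mk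
      (f := fun q x => (vrCellEdges grid rows cols y x).foldl (fun q e => ufUnion q n e.1 e.2) q)
      (g := vrFirstUpd grid cols y) (List.range cols) a b
  rw [houter, PySem.List.foldl_prod_mk
    (f := fun q y => (List.range cols).foldl
      (fun q x => (vrCellEdges grid rows cols y x).foldl (fun q e => ufUnion q n e.1 e.2) q) q)
    (g := fun o y => (List.range cols).foldl (vrFirstUpd grid cols y) o)]
  refine Prod.ext ?_ ?_
  · -- parent component: fold over the flattened edge list
    show _ = vrParentFinal grid rows cols n
    rw [vrParentFinal, vrAllEdges]
    simp only [foldl_flatMap_eq]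
  · -- first component: the first empty cell of the row-major scan
    show (List.range rows).foldl (fun o y => (List.range cols).foldl (vrFirstUpd grid cols y) o)
        none = (vrStart grid rows cols).map (fun s => s.2 * cols + s.1)
    have hstepA : (List.range rows).foldl
        (fun (o : Option Nat) y => (List.range cols).foldl (vrFirstUpd grid cols y) o) none =
        (List.range rows).foldl
          (keepFirst (fun y => (List.range cols).findSome?
            (fun x => if vrCellN grid y x = 0 then some (y * cols + x) else none))) none := by
      refine congrArg (fun f => List.foldl f none (List.range rows))
        (funext fun o => funext fun y => ?_)
      have hfu : vrFirstUpd grid cols y =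
          keepFirst (fun x => if vrCellN grid y x = 0 then some (y * cols + x) else none) := by
        funext o' x
        cases o' <;> simp [vrFirstUpd, keepFirst]
      rw [hfu]
      cases o with
      | some f => simp [keepFirst, foldl_keepFirst_some]
      | none => simp [keepFirst, foldl_keepFirst_none]
    rw [hstepA, foldl_keepFirst_none]
    rw [vrStart, findSome?_map_opt]
    refine congrArg (fun f => List.findSome? f (List.range rows)) (funext fun y => ?_)
    rw [Option.map_map, findSome?_guard (P := fun x => vrCellN grid y x = 0)
      (h := fun x => y * cols + x)]
    have hp : (fun x : Nat => vrCell grid (y : Int) (x : Int) == 0) =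
        (fun x : Nat => decide (vrCellN grid y x = 0)) := by
      funext x
      by_cases h : vrCellN grid y x = 0 <;> simp [vrCell_natCast, h]
    rw [hp]
    rfl

-- membership in the edge list
theorem mem_allEdges {grid : List (List Int)} {e : Nat × Nat} :
    e ∈ vrAllEdges grid grid.length (grid.getD 0 []).length ↔
      ∃ x y : Nat, vrEmp grid (x, y) ∧
        ((vrEmp grid (x + 1, y) ∧
            e = (y * (grid.getD 0 []).length + x, y * (grid.getD 0 []).length + x + 1)) ∨
         (vrEmp grid (x, y + 1) ∧
            e = (y * (grid.getD 0 []).length + x, (y + 1) * (grid.getD 0 []).length + x))) := by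
  constructor
  · intro h
    simp only [vrAllEdges, List.mem_flatMap, List.mem_range] at h
    obtain ⟨y, hy, x, hx, he⟩ := h
    rw [vrCellEdges] at he
    by_cases h0 : vrCellN grid y x = 0
    · rw [if_pos h0] at he
      rcases List.mem_append.mp he with h1 | h1
      · split_ifs at h1 with hc
        · simp only [List.mem_singleton] at h1
          exact ⟨x, y, ⟨hx, hy, h0⟩, Or.inl ⟨⟨hc.1, hy, hc.2⟩, h1⟩⟩
        · simp at h1
      · split_ifs at h1 with hc
        · simp only [List.mem_singleton] at h1
          exact ⟨x, y, ⟨hx, hy, h0⟩, Or.inr ⟨⟨hx, hc.1, hc.2⟩, h1⟩⟩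
        · simp at h1
    · rw [if_neg h0] at he; simp at he
  · rintro ⟨x, y, hemp, ⟨hemp2, rfl⟩ | ⟨hemp2, rfl⟩⟩
    · simp only [vrAllEdges, List.mem_flatMap, List.mem_range]
      refine ⟨y, hemp.2.1, x, hemp.1, ?_⟩
      rw [vrCellEdges, if_pos hemp.2.2]
      apply List.mem_append.mpr
      left
      rw [if_pos ⟨hemp2.1, hemp2.2.2⟩]
      simp
    · simp only [vrAllEdges, List.mem_flatMap, List.mem_range]
      refine ⟨y, hemp.2.1, x, hemp.1, ?_⟩
      rw [vrCellEdges, if_pos hemp.2.2]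
      apply List.mem_append.mpr
      right
      rw [if_pos ⟨hemp2.2.1, hemp2.2.2⟩]
      simp

theorem allEdges_bounds {grid : List (List Int)} :
    ∀ e ∈ vrAllEdges grid grid.length (grid.getD 0 []).length,
      e.1 < grid.length * (grid.getD 0 []).length ∧
      e.2 < grid.length * (grid.getD 0 []).length := by
  intro e he
  rw [mem_allEdges] at he
  obtain ⟨x, y, hemp, hc | hc⟩ := he
  · obtain ⟨hemp2, rfl⟩ := hc
    constructor
    · exact vrIdx_lt (c := (x, y)) hemp.1 hemp.2.1
    · have := vrIdx_lt (c := (x + 1, y)) hemp2.1 hemp2.2.1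
      simpa [vrIdx, Nat.add_assoc] using this
  · obtain ⟨hemp2, rfl⟩ := hc
    constructor
    · exact vrIdx_lt (c := (x, y)) hemp.1 hemp.2.1
    · exact vrIdx_lt (c := (x, y + 1)) hemp2.1 hemp2.2.1

-- the equivalence closure of the right/down edge list is exactly connectivity
theorem eqvGen_edges_decode {grid : List (List Int)} {i j : Nat}
    (hg : Relation.EqvGen
      (fun u v => (u, v) ∈ vrAllEdges grid grid.length (grid.getD 0 []).length) i j) :
    (∀ c : Nat × Nat, c.1 < (grid.getD 0 []).length → c.2 < grid.length →
      vrIdx (grid.getD 0 []).length c = i →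
      ∃ d : Nat × Nat, d.1 < (grid.getD 0 []).length ∧ d.2 < grid.length ∧
        vrIdx (grid.getD 0 []).length d = j ∧ vrConn grid c d) ∧
    (∀ c : Nat × Nat, c.1 < (grid.getD 0 []).length → c.2 < grid.length →
      vrIdx (grid.getD 0 []).length c = j →
      ∃ d : Nat × Nat, d.1 < (grid.getD 0 []).length ∧ d.2 < grid.length ∧
        vrIdx (grid.getD 0 []).length d = i ∧ vrConn grid c d) := by
  induction hg with
  | rel u v hr =>
    have hr' : (u, v) ∈ vrAllEdges grid grid.length (grid.getD 0 []).length := hr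
    rw [mem_allEdges] at hr'
    obtain ⟨x, y, hemp, hcase | hcase⟩ := hr'
    · obtain ⟨hemp2, uv⟩ := hcase
      rw [Prod.mk.injEq] at uv
      have hstp : vrStp grid (x, y) (x + 1, y) := ⟨hemp, hemp2, Or.inl ⟨rfl, Or.inl rfl⟩⟩
      constructor
      · intro c h1 h2 hidx
        have hceq : c = (x, y) := vrIdx_inj h1 hemp.1 (by rw [hidx, uv.1]; rfl)
        subst hceq
        exact ⟨(x + 1, y), hemp2.1, hemp2.2.1, by rw [uv.2]; rfl,
          Relation.ReflTransGen.single hstp⟩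
      · intro c h1 h2 hidx
        have hceq : c = (x + 1, y) := vrIdx_inj h1 hemp2.1 (by rw [hidx, uv.2]; rfl)
        subst hceq
        exact ⟨(x, y), hemp.1, hemp.2.1, by rw [uv.1]; rfl,
          Relation.ReflTransGen.single (vrStp_symm grid hstp)⟩
    · obtain ⟨hemp2, uv⟩ := hcase
      rw [Prod.mk.injEq] at uv
      have hstp : vrStp grid (x, y) (x, y + 1) := ⟨hemp, hemp2, Or.inr ⟨rfl, Or.inl rfl⟩⟩
      constructor
      · intro c h1 h2 hidx
        have hceq : c = (x, y) := vrIdx_inj h1 hemp.1 (by rw [hidx, uv.1]; rfl)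
        subst hceq
        exact ⟨(x, y + 1), hemp2.1, hemp2.2.1, by rw [uv.2]; rfl,
          Relation.ReflTransGen.single hstp⟩
      · intro c h1 h2 hidx
        have hceq : c = (x, y + 1) := vrIdx_inj h1 hemp2.1 (by rw [hidx, uv.2]; rfl)
        subst hceq
        exact ⟨(x, y), hemp.1, hemp.2.1, by rw [uv.1]; rfl,
          Relation.ReflTransGen.single (vrStp_symm grid hstp)⟩
  | refl z =>
    constructor <;> exact fun c h1 h2 hidx => ⟨c, h1, h2, hidx, Relation.ReflTransGen.refl⟩
  | symm a b h ih => exact ⟨ih.2, ih.1⟩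
  | trans a b c h1 h2 ih1 ih2 =>
    constructor
    · intro cc k1 k2 hidx
      obtain ⟨d, d1, d2, didx, dconn⟩ := ih1.1 cc k1 k2 hidx
      obtain ⟨e, e1, e2, eidx, econn⟩ := ih2.1 d d1 d2 didx
      exact ⟨e, e1, e2, eidx, dconn.trans econn⟩
    · intro cc k1 k2 hidx
      obtain ⟨d, d1, d2, didx, dconn⟩ := ih2.2 cc k1 k2 hidx
      obtain ⟨e, e1, e2, eidx, econn⟩ := ih1.2 d d1 d2 didx
      exact ⟨e, e1, e2, eidx, dconn.trans econn⟩

theorem conn_eqvGen_edges {grid : List (List Int)} {c d : Nat × Nat}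
    (hconn : vrConn grid c d) :
    Relation.EqvGen
      (fun u v => (u, v) ∈ vrAllEdges grid grid.length (grid.getD 0 []).length)
      (vrIdx (grid.getD 0 []).length c) (vrIdx (grid.getD 0 []).length d) := by
  induction hconn with
  | refl => exact Relation.EqvGen.refl _
  | tail h1 h2 ih =>
    rename_i b c'
    refine Relation.EqvGen.trans _ _ _ ih ?_
    obtain ⟨hb, hcp, hadj⟩ := h2
    obtain ⟨bx, byy⟩ := b
    obtain ⟨cx, cy⟩ := c'
    dsimp only at hadj
    rcases hadj with ⟨hyeq, hxc | hxc⟩ | ⟨hxeq, hyc | hyc⟩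
    · subst hyeq; subst hxc
      exact Relation.EqvGen.rel _ _
        (mem_allEdges.mpr ⟨bx, byy, hb, Or.inl ⟨hcp, rfl⟩⟩)
    · subst hyeq; subst hxc
      exact Relation.EqvGen.symm _ _ (Relation.EqvGen.rel _ _
        (mem_allEdges.mpr ⟨cx, byy, hcp, Or.inl ⟨hb, rfl⟩⟩))
    · subst hxeq; subst hyc
      exact Relation.EqvGen.rel _ _
        (mem_allEdges.mpr ⟨bx, byy, hb, Or.inr ⟨hcp, rfl⟩⟩)
    · subst hxeq; subst hyc
      exact Relation.EqvGen.symm _ _ (Relation.EqvGen.rel _ _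
        (mem_allEdges.mpr ⟨bx, cy, hcp, Or.inr ⟨hb, rfl⟩⟩))

theorem eqvGen_edges_iff_conn {grid : List (List Int)} {c d : Nat × Nat}
    (hc1 : c.1 < (grid.getD 0 []).length) (hc2 : c.2 < grid.length)
    (hd1 : d.1 < (grid.getD 0 []).length) (hd2 : d.2 < grid.length) :
    Relation.EqvGen
      (fun u v => (u, v) ∈ vrAllEdges grid grid.length (grid.getD 0 []).length)
      (vrIdx (grid.getD 0 []).length c) (vrIdx (grid.getD 0 []).length d) ↔
    vrConn grid c d := by
  constructor
  · intro hg
    obtain ⟨d', d1, d2, didx, dconn⟩ := (eqvGen_edges_decode hg).1 c hc1 hc2 rfl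
    have hde : d' = d := vrIdx_inj d1 hd1 didx
    exact hde ▸ dconn
  · exact conn_eqvGen_edges

-- ---------- A: the BFS visits exactly the cells connected to the start ----------

def vrSound (grid : List (List Int)) (s : Nat × Nat) (V : List (Int × Int)) : Prop :=
  ∀ p ∈ V, ∃ c : Nat × Nat, vrEmp grid c ∧ p = vrEnc c ∧ vrConn grid s c

def vrClosedExcept (grid : List (List Int)) (V Q : List (Int × Int)) : Prop :=
  ∀ c : Nat × Nat, vrEmp grid c → vrEnc c ∈ V → vrEnc c ∉ Q →
    ∀ d, vrStp grid c d → vrEnc d ∈ V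

def vrBfsInv (grid : List (List Int)) (s : Nat × Nat) (V Q : List (Int × Int)) : Prop :=
  (∀ p ∈ Q, p ∈ V) ∧ vrSound grid s V ∧ V.Nodup ∧ vrClosedExcept grid V Q ∧ vrEnc s ∈ V

theorem vrSound_length_le {grid : List (List Int)} {s : Nat × Nat} {V : List (Int × Int)}
    (hS : vrSound grid s V) (hN : V.Nodup) :
    V.length ≤ grid.length * (grid.getD 0 []).length := by
  have hsub : V ⊆ (List.range grid.length).flatMap
      (fun (y : Nat) => (List.range (grid.getD 0 []).length).map
        (fun (x : Nat) => ((x : Int), (y : Int)))) := by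
    intro p hp
    obtain ⟨c, hemp, rfl, -⟩ := hS p hp
    exact List.mem_flatMap.mpr ⟨c.2, List.mem_range.mpr hemp.2.1,
      List.mem_map.mpr ⟨c.1, List.mem_range.mpr hemp.1, rfl⟩⟩
  have hlen : ((List.range grid.length).flatMap
      (fun (y : Nat) => (List.range (grid.getD 0 []).length).map
        (fun (x : Nat) => ((x : Int), (y : Int))))).length =
      grid.length * (grid.getD 0 []).length := by
    simp [List.length_flatMap]
  calc V.length ≤ _ := (List.Nodup.subperm hN hsub).length_le
    _ = grid.length * (grid.getD 0 []).length := hlen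

theorem bfs_fold (grid : List (List Int)) (s cc : Nat × Nat)
    (hcc : vrEmp grid cc) (hconn : vrConn grid s cc) (c : Int × Int) (hc : c = vrEnc cc) :
    ∀ (L : List (Int × Int)), (∀ d ∈ L, d.1.natAbs + d.2.natAbs = 1) →
    ∀ (V Q : List (Int × Int)), vrSound grid s V → V.Nodup →
      ∃ A, (L.foldl
        (fun (st : PySem.Set (Int × Int) × List (Int × Int)) d =>
          let nx := c.1 + d.1
          let ny := c.2 + d.2
          if 0 ≤ nx ∧ nx < ((grid.getD 0 []).length : Int) ∧ 0 ≤ ny ∧ ny < (grid.length : Int) ∧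
              (nx, ny) ∉ st.1 ∧ vrCell grid ny nx = 0
          then (PySem.Set.add st.1 (nx, ny), st.2 ++ [(nx, ny)])
          else st)
        (V, Q)) = (V ++ A, Q ++ A) ∧
      vrSound grid s (V ++ A) ∧ (V ++ A).Nodup ∧
      (∀ d ∈ L, ∀ dc : Nat × Nat, vrEmp grid dc →
        vrEnc dc = (c.1 + d.1, c.2 + d.2) → vrEnc dc ∈ V ++ A) := by
  intro L
  induction L with
  | nil =>
    intro _ V Q hS hN
    exact ⟨[], by simp, by simpa using hS, by simpa using hN, by simp⟩
  | cons d L ih =>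
    intro hdl V Q hS hN
    have hdu : d.1.natAbs + d.2.natAbs = 1 := hdl d List.mem_cons_self
    have hL : ∀ d' ∈ L, d'.1.natAbs + d'.2.natAbs = 1 :=
      fun d' h => hdl d' (List.mem_cons_of_mem _ h)
    rw [List.foldl_cons]
    dsimp only
    by_cases hg : 0 ≤ c.1 + d.1 ∧ c.1 + d.1 < ((grid.getD 0 []).length : Int) ∧
        0 ≤ c.2 + d.2 ∧ c.2 + d.2 < (grid.length : Int) ∧
        (c.1 + d.1, c.2 + d.2) ∉ V ∧ vrCell grid (c.2 + d.2) (c.1 + d.1) = 0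
    · obtain ⟨hg1, hg2, hg3, hg4, hg5, hg6⟩ := hg
      rw [if_pos ⟨hg1, hg2, hg3, hg4, hg5, hg6⟩]
      have hadd : PySem.Set.add V (c.1 + d.1, c.2 + d.2) =
          V ++ [(c.1 + d.1, c.2 + d.2)] := by
        simp [PySem.Set.add, hg5]
      rw [hadd]
      have hc1 : c.1 = (cc.1 : Int) := by rw [hc]; rfl
      have hc2 : c.2 = (cc.2 : Int) := by rw [hc]; rfl
      have hempd : vrEmp grid ((c.1 + d.1).toNat, (c.2 + d.2).toNat) :=
        ⟨by omega, by omega, hg6⟩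
      have henc : vrEnc ((c.1 + d.1).toNat, (c.2 + d.2).toNat) = (c.1 + d.1, c.2 + d.2) := by
        simp [vrEnc, Int.toNat_of_nonneg hg1, Int.toNat_of_nonneg hg3]
      have hstp : vrStp grid cc ((c.1 + d.1).toNat, (c.2 + d.2).toNat) := by
        refine ⟨hcc, hempd, ?_⟩
        dsimp only
        omega
      have hconn' : vrConn grid s ((c.1 + d.1).toNat, (c.2 + d.2).toNat) :=
        hconn.tail hstp
      have hS1 : vrSound grid s (V ++ [(c.1 + d.1, c.2 + d.2)]) := by
        intro q hq
        rcases List.mem_append.mp hq with h | h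
        · exact hS q h
        · rw [List.mem_singleton] at h
          subst h
          exact ⟨_, hempd, henc.symm, hconn'⟩
      have hN1 : (V ++ [(c.1 + d.1, c.2 + d.2)]).Nodup := by
        rw [List.nodup_append]
        refine ⟨hN, List.nodup_singleton _, ?_⟩
        intro a haV b hbS heq
        rw [List.mem_singleton] at hbS
        subst hbS
        subst heq
        exact hg5 haV
      obtain ⟨A, hfoldA, hSA, hNA, hcovA⟩ := ih hL _ _ hS1 hN1
      refine ⟨(c.1 + d.1, c.2 + d.2) :: A, ?_, ?_, ?_, ?_⟩
      · rw [hfoldA]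
        simp [List.append_assoc]
      · simpa [List.append_assoc] using hSA
      · simpa [List.append_assoc] using hNA
      · intro d' hd' dc' hempd' hencd'
        rcases List.mem_cons.mp hd' with heq | hmem
        · rw [heq] at hencd'
          have hdc : dc' = ((c.1 + d.1).toNat, (c.2 + d.2).toNat) :=
            vrEnc_inj (by rw [hencd', henc])
          subst hdc
          have hmm : vrEnc ((c.1 + d.1).toNat, (c.2 + d.2).toNat) ∈
              V ++ [(c.1 + d.1, c.2 + d.2)] := by
            rw [henc]
            simp
          have h2 := List.mem_append_left A hmm
          simpa [List.append_assoc] using h2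
        · have := hcovA d' hmem dc' hempd' hencd'
          simpa [List.append_assoc] using this
    · rw [if_neg hg]
      obtain ⟨A, hfoldA, hSA, hNA, hcovA⟩ := ih hL V Q hS hN
      refine ⟨A, hfoldA, hSA, hNA, ?_⟩
      intro d' hd' dc' hempd' hencd'
      rcases List.mem_cons.mp hd' with heq | hmem
      · rw [heq] at hencd'
        have e1 : (dc'.1 : Int) = c.1 + d.1 := congrArg Prod.fst hencd'
        have e2 : (dc'.2 : Int) = c.2 + d.2 := congrArg Prod.snd hencd'
        have hcell : vrCell grid (c.2 + d.2) (c.1 + d.1) = 0 := by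
          rw [← e1, ← e2, vrCell_natCast]
          exact hempd'.2.2
        have hb1 : (0 : Int) ≤ c.1 + d.1 := by omega
        have hb2 : c.1 + d.1 < ((grid.getD 0 []).length : Int) := by
          have := hempd'.1
          omega
        have hb3 : (0 : Int) ≤ c.2 + d.2 := by omega
        have hb4 : c.2 + d.2 < (grid.length : Int) := by
          have := hempd'.2.1
          omega
        have hin : (c.1 + d.1, c.2 + d.2) ∈ V := by
          by_contra hnin
          exact hg ⟨hb1, hb2, hb3, hb4, hnin, hcell⟩
        rw [hencd']
        exact List.mem_append_left A hin
      · exact hcovA d' hmem dc' hempd' hencd'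

theorem bfs_run (grid : List (List Int)) (s : Nat × Nat) :
    ∀ (fuel : Nat) (V Q : List (Int × Int)), vrBfsInv grid s V Q →
      Q.length + (grid.length * (grid.getD 0 []).length - V.length) ≤ fuel →
      vrSound grid s (vrBfs grid grid.length (grid.getD 0 []).length fuel V Q) ∧
      vrEnc s ∈ vrBfs grid grid.length (grid.getD 0 []).length fuel V Q ∧
      (∀ c d : Nat × Nat, vrEmp grid c →
        vrEnc c ∈ vrBfs grid grid.length (grid.getD 0 []).length fuel V Q →
        vrStp grid c d →
        vrEnc d ∈ vrBfs grid grid.length (grid.getD 0 []).length fuel V Q) := by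
  intro fuel
  induction fuel with
  | zero =>
    intro V Q hInv hfuel
    obtain ⟨hQV, hS, hN, hCE, hsV⟩ := hInv
    have hQ : Q = [] := List.eq_nil_of_length_eq_zero (by omega)
    subst hQ
    exact ⟨hS, hsV, fun c d hemp hc hstp => hCE c hemp hc (by simp) d hstp⟩
  | succ fuel ih =>
    intro V Q hInv hfuel
    obtain ⟨hQV, hS, hN, hCE, hsV⟩ := hInv
    cases Q with
    | nil =>
      exact ⟨hS, hsV, fun c d hemp hc hstp => hCE c hemp hc (by simp) d hstp⟩
    | cons c rest =>
      obtain ⟨cc, hemp, hcenc, hconn⟩ := hS c (hQV c List.mem_cons_self)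
      obtain ⟨A, hfold, hSA, hNA, hcov⟩ := bfs_fold grid s cc hemp hconn c hcenc
        [((0 : Int), (-1 : Int)), (0, 1), (-1, 0), (1, 0)] (by decide)
        V rest hS hN
      have hrw : vrBfs grid grid.length (grid.getD 0 []).length (fuel + 1) V (c :: rest) =
          vrBfs grid grid.length (grid.getD 0 []).length fuel (V ++ A) (rest ++ A) := by
        simp only [vrBfs]
        rw [hfold]
      rw [hrw]
      have hlenVA := vrSound_length_le hSA hNA
      apply ih
      · refine ⟨?_, hSA, hNA, ?_, List.mem_append_left A hsV⟩
        · intro q hq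
          rcases List.mem_append.mp hq with h | h
          · exact List.mem_append_left A (hQV q (List.mem_cons_of_mem _ h))
          · exact List.mem_append_right V h
        · intro c' hemp' hmem' hnotin' d' hstp'
          rcases List.mem_append.mp hmem' with hv | ha
          · by_cases hceq : vrEnc c' = c
            · have hcc' : c' = cc := vrEnc_inj (by rw [hceq, hcenc])
              subst hcc'
              obtain ⟨hb1, hb2, hadj⟩ := hstp'
              obtain ⟨dx, dy⟩ := d'
              dsimp only at hadj
              rcases hadj with ⟨hyeq, hxc | hxc⟩ | ⟨hxeq, hyc | hyc⟩
              · exact hcov (1, 0) (by decide) (dx, dy) hb2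
                  (by rw [hcenc]; simp [vrEnc, Prod.ext_iff]; omega)
              · exact hcov (-1, 0) (by decide) (dx, dy) hb2
                  (by rw [hcenc]; simp [vrEnc, Prod.ext_iff]; omega)
              · exact hcov (0, 1) (by decide) (dx, dy) hb2
                  (by rw [hcenc]; simp [vrEnc, Prod.ext_iff]; omega)
              · exact hcov (0, -1) (by decide) (dx, dy) hb2
                  (by rw [hcenc]; simp [vrEnc, Prod.ext_iff]; omega)
            · have hnc : vrEnc c' ∉ c :: rest := by
                intro hin
                rcases List.mem_cons.mp hin with h | h
                · exact hceq h
                · exact hnotin' (List.mem_append_left A h)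
              exact List.mem_append_left A (hCE c' hemp' hv hnc d' hstp')
          · exact absurd (List.mem_append_right rest ha) hnotin'
      · have hlc : (c :: rest).length = rest.length + 1 := rfl
        rw [List.length_append, List.length_append] at *
        omega

theorem conn_mem {grid : List (List Int)} {s : Nat × Nat} {V : List (Int × Int)}
    (hs : vrEnc s ∈ V)
    (hcl : ∀ c d : Nat × Nat, vrEmp grid c → vrEnc c ∈ V → vrStp grid c d → vrEnc d ∈ V)
    {c : Nat × Nat} (hconn : vrConn grid s c) : vrEnc c ∈ V := by
  induction hconn with
  | refl => exact hs
  | tail h1 h2 ih => exact hcl _ _ h2.1 ih h2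

-- the first empty cell found by the scan
theorem vrStart_emp {grid : List (List Int)} {s : Nat × Nat}
    (h : vrStart grid grid.length (grid.getD 0 []).length = some s) : vrEmp grid s := by
  obtain ⟨y, hy, hsome⟩ := List.exists_of_findSome?_eq_some h
  cases hfind : (List.range (grid.getD 0 []).length).find?
      (fun (x : Nat) => vrCell grid (y : Int) (x : Int) == 0) with
  | none => rw [hfind] at hsome; simp at hsome
  | some x =>
    rw [hfind] at hsome
    simp only [Option.map_some, Option.some.injEq] at hsome
    have hx := List.find?_some hfind
    have hxm := List.mem_of_find?_eq_some hfind
    rw [List.mem_range] at hy hxm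
    have hcell : vrCellN grid y x = 0 := by
      rw [← vrCell_natCast]
      simpa using hx
    rw [← hsome]
    exact ⟨hxm, hy, hcell⟩

-- pointwise congruence for Bool all over a list
theorem vr_all_congr {α : Type} {l : List α} {f g : α → Bool}
    (h : ∀ x ∈ l, f x = g x) : l.all f = l.all g := by
  induction l with
  | nil => rfl
  | cons a l ih =>
    simp only [List.all_cons, h a List.mem_cons_self,
      ih (fun x hx => h x (List.mem_cons_of_mem _ hx))]

-- B's nested fold as a standalone value (definitionally the fold inside the port of B)
def vrAltFold (grid : List (List Int)) : List Nat × Option Nat :=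
  (List.range grid.length).foldl (fun st y =>
      (List.range (grid.getD 0 []).length).foldl (fun (st : List Nat × Option Nat) x =>
        if vrCellN grid y x = 0 then
          let first := match st.2 with
            | none => some (y * (grid.getD 0 []).length + x)
            | some f => some f
          let p1 := if x + 1 < (grid.getD 0 []).length ∧ vrCellN grid y (x + 1) = 0 then
              ufUnion st.1 (grid.length * (grid.getD 0 []).length)
                (y * (grid.getD 0 []).length + x) (y * (grid.getD 0 []).length + x + 1)
            else st.1
          let p2 := if y + 1 < grid.length ∧ vrCellN grid (y + 1) x = 0 then
              ufUnion p1 (grid.length * (grid.getD 0 []).length)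
                (y * (grid.getD 0 []).length + x) ((y + 1) * (grid.getD 0 []).length + x)
            else p1
          (p2, first)
        else st) st)
    (List.range (grid.length * (grid.getD 0 []).length), (none : Option Nat))

theorem vrAltFold_eq (grid : List (List Int)) :
    vrAltFold grid =
      (vrParentFinal grid grid.length (grid.getD 0 []).length
        (grid.length * (grid.getD 0 []).length),
       (vrStart grid grid.length (grid.getD 0 []).length).map
         (fun s => s.2 * (grid.getD 0 []).length + s.1)) :=
  bAlt_state grid grid.length (grid.getD 0 []).length (grid.length * (grid.getD 0 []).length)

-- the two programs agree on every input
theorem vr_AB_eq (grid : List (List Int)) :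
    verify_reachability_py grid = verify_reachability_py_alt grid := by
  have hA : verify_reachability_py grid =
      (match vrStart grid grid.length (grid.getD 0 []).length with
       | none => false
       | some s =>
         (List.range grid.length).all fun y => (List.range (grid.getD 0 []).length).all fun x =>
           (vrCell grid (y : Int) (x : Int) != 0) ||
             decide (((x : Int), (y : Int)) ∈ vrBfs grid grid.length (grid.getD 0 []).length
               (grid.length * (grid.getD 0 []).length)
               (PySem.Set.ofList [((s.1 : Int), (s.2 : Int))]) [((s.1 : Int), (s.2 : Int))])) :=
    rfl
  have hB : verify_reachability_py_alt grid =
      (match (vrAltFold grid).2 with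
       | none => false
       | some first =>
         (List.range grid.length).all fun y => (List.range (grid.getD 0 []).length).all fun x =>
           (vrCellN grid y x != 0) ||
             decide (ufFind (vrAltFold grid).1 (grid.length * (grid.getD 0 []).length)
                 (y * (grid.getD 0 []).length + x) =
               ufFind (vrAltFold grid).1 (grid.length * (grid.getD 0 []).length) first)) :=
    rfl
  rw [hA, hB, vrAltFold_eq]
  cases hs : vrStart grid grid.length (grid.getD 0 []).length with
  | none => simp
  | some s =>
    simp only [Option.map_some]
    have hemp_s : vrEmp grid s := vrStart_emp hs
    have hrowpos : 0 < grid.length := Nat.lt_of_le_of_lt (Nat.zero_le _) hemp_s.2.1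
    have hcolpos : 0 < (grid.getD 0 []).length := Nat.lt_of_le_of_lt (Nat.zero_le _) hemp_s.1
    have hnpos : 0 < grid.length * (grid.getD 0 []).length := Nat.mul_pos hrowpos hcolpos
    have hInv0 : vrBfsInv grid s (PySem.Set.ofList [vrEnc s]) [vrEnc s] := by
      refine ⟨?_, ?_, ?_, ?_, ?_⟩
      · intro p hp
        rw [PySem.Set.mem_ofList]
        exact hp
      · intro p hp
        rw [PySem.Set.mem_ofList, List.mem_singleton] at hp
        subst hp
        exact ⟨s, hemp_s, rfl, Relation.ReflTransGen.refl⟩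
      · exact PySem.Set.nodup_ofList _
      · intro c' h1 h2 h3 d' h4
        rw [PySem.Set.mem_ofList] at h2
        exact absurd h2 h3
      · rw [PySem.Set.mem_ofList]
        exact List.mem_singleton.mpr rfl
    have hmeas : ([vrEnc s] : List (Int × Int)).length +
        (grid.length * (grid.getD 0 []).length - (PySem.Set.ofList [vrEnc s]).length) ≤
        grid.length * (grid.getD 0 []).length := by
      have h1 : (PySem.Set.ofList [vrEnc s]).length = 1 := rfl
      rw [h1]
      simp only [List.length_singleton]
      omega
    obtain ⟨hSV, hsV, hclV⟩ := bfs_run grid s (grid.length * (grid.getD 0 []).length)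
      (PySem.Set.ofList [vrEnc s]) [vrEnc s] hInv0 hmeas
    obtain ⟨hInvF, hIffF⟩ := uf_fold (n := grid.length * (grid.getD 0 []).length)
      (vrAllEdges grid grid.length (grid.getD 0 []).length) (List.range _)
      (uf_range_inv _) allEdges_bounds
    apply vr_all_congr
    intro y hy
    apply vr_all_congr
    intro x hx
    rw [List.mem_range] at hy hx
    rw [vrCell_natCast]
    by_cases h0 : vrCellN grid y x = 0
    · have hempc : vrEmp grid (x, y) := ⟨hx, hy, h0⟩
      have hmemiff : (vrEnc (x, y) ∈ vrBfs grid grid.length (grid.getD 0 []).length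
          (grid.length * (grid.getD 0 []).length) (PySem.Set.ofList [vrEnc s]) [vrEnc s]) ↔
          vrConn grid s (x, y) := by
        constructor
        · intro h
          obtain ⟨c', hem', heq', hcon'⟩ := hSV _ h
          have hc' : c' = (x, y) := vrEnc_inj heq'.symm
          exact hc' ▸ hcon'
        · exact conn_mem hsV hclV
      have hix : y * (grid.getD 0 []).length + x <
          grid.length * (grid.getD 0 []).length := vrIdx_lt (c := (x, y)) hx hy
      have his : s.2 * (grid.getD 0 []).length + s.1 <
          grid.length * (grid.getD 0 []).length := vrIdx_lt (c := s) hemp_s.1 hemp_s.2.1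
      have h1 := uf_sameRt_iff (p := vrParentFinal grid grid.length ((grid.getD 0 []).length)
          (grid.length * (grid.getD 0 []).length)) hInvF hix his
      have h2 := hIffF (y * (grid.getD 0 []).length + x) (s.2 * (grid.getD 0 []).length + s.1)
      have h3 : Relation.EqvGen (fun u v => PEdge (List.range
            (grid.length * (grid.getD 0 []).length)) u v ∨
            (u, v) ∈ vrAllEdges grid grid.length (grid.getD 0 []).length)
            (y * (grid.getD 0 []).length + x) (s.2 * (grid.getD 0 []).length + s.1) ↔
          Relation.EqvGen (fun u v =>
            (u, v) ∈ vrAllEdges grid grid.length (grid.getD 0 []).length)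
            (y * (grid.getD 0 []).length + x) (s.2 * (grid.getD 0 []).length + s.1) := by
        constructor
        · exact eqvGen_of_rel_iff (fun u v => by rw [pedge_range_false]; tauto)
        · exact eqvGen_of_rel_iff (fun u v => by rw [pedge_range_false]; tauto)
      have h4 : Relation.EqvGen (fun u v =>
            (u, v) ∈ vrAllEdges grid grid.length (grid.getD 0 []).length)
            (y * (grid.getD 0 []).length + x) (s.2 * (grid.getD 0 []).length + s.1) ↔
          vrConn grid (x, y) s :=
        eqvGen_edges_iff_conn (c := (x, y)) (d := s) hx hy hemp_s.1 hemp_s.2.1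
      have h5 : vrConn grid (x, y) s ↔ vrConn grid s (x, y) :=
        ⟨vrConn_symm grid, vrConn_symm grid⟩
      have hBiff := (((h1.trans h2).trans h3).trans h4).trans h5
      exact congrArg (fun b => (vrCellN grid y x != 0) || b)
        (decide_eq_decide.mpr (hmemiff.trans hBiff.symm))
    · have ht : (vrCellN grid y x != 0) = true := by simp [h0]
      rw [ht, Bool.true_or, Bool.true_or]

-- ===== VERDICT (by name: the statement is the Claim_ definition above) =====
theorem verify_reachability_py_spec : Claim_equal_verify_reachability_py := by
  intro grid _ _
  unfold Spec_verify_reachability_py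
  exact vr_AB_eq grid
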